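-- pv_equiv track=rewrite | github.com/BradleyPelton/Leetcode-Solutions | deleteme234985723045/deleteme.py | norepeats
-- ===== SOURCE A (Python) =====
-- def norepeats(astring):
--     astring = astring.replace("-","")
--     try:
--         for i in range(len(astring)):
--             if (astring[i] == astring[i+1] and astring[i] == astring[i+2]
--                 and astring[i] == astring[i+3]):
--                 return(False)
--     except IndexError:
--         pass
--     return(True)
-- ===== SOURCE B (Python) =====
-- def norepeats(astring):
--     s = astring.replace("-", "")
--     if not s:
--         return True
--     prev = s[0]
--     count = 1
--     for c in s[1:]:
--         if c == prev:
--             count += 1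
--             if count >= 4:
--                 return False
--         else:
--             prev = c
--             count = 1
--     return True
-- ===== Notes on version B (the rewrite author's own statement) =====
-- stated objective: simpler
-- what changed: Replaces the fixed 4-character forward-window check guarded by a try/except IndexError with a single pass that maintains a run-length counter and returns False as soon as a run reaches 4.
import Mathlib
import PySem

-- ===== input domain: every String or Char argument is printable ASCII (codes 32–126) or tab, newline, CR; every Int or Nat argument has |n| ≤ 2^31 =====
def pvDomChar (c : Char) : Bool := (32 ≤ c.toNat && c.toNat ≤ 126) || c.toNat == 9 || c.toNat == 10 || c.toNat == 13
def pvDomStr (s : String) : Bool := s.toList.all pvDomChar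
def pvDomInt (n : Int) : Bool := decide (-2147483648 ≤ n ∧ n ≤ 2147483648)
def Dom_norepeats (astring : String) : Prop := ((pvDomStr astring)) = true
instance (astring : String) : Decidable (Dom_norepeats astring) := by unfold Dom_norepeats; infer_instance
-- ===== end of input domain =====

-- B replaces A's fixed 4-character window check (guarded by try/except IndexError) with a
-- single pass maintaining a run-length counter; same values everywhere, objective: simpler.

-- ===== PORT A =====
-- the try/for loop: at index i, reading t[i+1]/t[i+2]/t[i+3] may raise IndexError, which the
-- except catches and the function returns True.  Indices are nonnegative Nats here, so
-- getElem? is exactly Python's indexing with IndexError ↦ none.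
def norepeatsGoA (t : List Char) (i : Nat) : Bool :=
  if i < t.length then
    match t[i]?, t[i+1]?, t[i+2]?, t[i+3]? with
    | some a, some b, some c, some d =>
        if a = b ∧ a = c ∧ a = d then false else norepeatsGoA t (i+1)
    | _, _, _, _ => true   -- IndexError caught: return True
  else true                -- loop finished: return True
termination_by t.length - i

def norepeats (astring : String) : Bool :=
  let t := (PySem.Str.replace astring "-" "").toList
  norepeatsGoA t 0

-- ===== PORT B =====
-- the 'for c in s[1:]' loop with prev/count state and early return False
def norepeatsGoB (l : List Char) (prev : Char) (count : Nat) : Bool :=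
  match l with
  | [] => true
  | c :: rest =>
      if c = prev then
        if count + 1 ≥ 4 then false else norepeatsGoB rest prev (count + 1)
      else
        norepeatsGoB rest c 1

def norepeats_alt (astring : String) : Bool :=
  let s := (PySem.Str.replace astring "-" "").toList
  match s with
  | [] => true
  | c :: rest => norepeatsGoB rest c 1

-- ===== PRECONDITION & SPEC =====
def Spec_norepeats (astring : String) (out : Bool) : Prop := out = norepeats_alt astring
instance (astring : String) (out : Bool) : Decidable (Spec_norepeats astring out) := by unfold Spec_norepeats; infer_instance

-- ===== CLAIM (what is proved, stated in full; the proofs are below) =====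
def Claim_equal_norepeats : Prop := ∀ (astring : String), Dom_norepeats astring → Spec_norepeats astring (norepeats astring)

-- ===== LEMMAS AND PROOFS =====

-- reference form: the window scan as structural recursion on the suffix
def winF : List Char → Bool
  | a :: b :: c :: d :: rest => if a = b ∧ a = c ∧ a = d then false else winF (b :: c :: d :: rest)
  | _ => true

theorem winF_short (l : List Char) (h : l.length < 4) : winF l = true := by
  match l, h with
  | [], _ => rfl
  | [_], _ => rfl
  | [_, _], _ => rfl
  | [_, _, _], _ => rfl
  | _ :: _ :: _ :: _ :: _, h => simp at h; omega

-- A's index loop equals the suffix recursion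
theorem goA_eq_winF (t : List Char) (i : Nat) : norepeatsGoA t i = winF (t.drop i) := by
  by_cases h : i < t.length
  · have hd : t.drop i = t[i] :: t.drop (i+1) := (List.getElem_cons_drop h).symm
    rw [norepeatsGoA, if_pos h]
    have h0 : t[i]? = some t[i] := List.getElem?_eq_getElem h
    rw [h0]
    rcases h1 : t[i+1]? with _ | b
    · have hlen : t.length ≤ i + 1 := by
        by_contra hc; push_neg at hc; simp [List.getElem?_eq_getElem hc] at h1
      have hlt : (t.drop i).length < 4 := by simp; omega
      simpa using (winF_short _ hlt).symm
    · rcases h2 : t[i+2]? with _ | c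
      · have hlen : t.length ≤ i + 2 := by
          by_contra hc; push_neg at hc; simp [List.getElem?_eq_getElem hc] at h2
        have hlt : (t.drop i).length < 4 := by simp; omega
        simpa using (winF_short _ hlt).symm
      · rcases h3 : t[i+3]? with _ | d
        · have hlen : t.length ≤ i + 3 := by
            by_contra hc; push_neg at hc; simp [List.getElem?_eq_getElem hc] at h3
          have hlt : (t.drop i).length < 4 := by simp; omega
          simpa using (winF_short _ hlt).symm
        · -- all four indices in range
          have hb : i + 1 < t.length := by
            by_contra hc; push_neg at hc; simp [List.getElem?_eq_none_iff.2 hc] at h1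
          have hcc : i + 2 < t.length := by
            by_contra hc; push_neg at hc; simp [List.getElem?_eq_none_iff.2 hc] at h2
          have hdd : i + 3 < t.length := by
            by_contra hc; push_neg at hc; simp [List.getElem?_eq_none_iff.2 hc] at h3
          have hb' : b = t[i+1] := by
            have e := List.getElem?_eq_getElem hb; rw [h1] at e; exact Option.some_inj.mp e
          have hc' : c = t[i+2] := by
            have e := List.getElem?_eq_getElem hcc; rw [h2] at e; exact Option.some_inj.mp e
          have hd' : d = t[i+3] := by
            have e := List.getElem?_eq_getElem hdd; rw [h3] at e; exact Option.some_inj.mp e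
          have hd1 : t.drop (i+1) = t[i+1] :: t.drop (i+2) := (List.getElem_cons_drop hb).symm
          have hd2 : t.drop (i+2) = t[i+2] :: t.drop (i+3) := (List.getElem_cons_drop hcc).symm
          have hd3 : t.drop (i+3) = t[i+3] :: t.drop (i+4) := (List.getElem_cons_drop hdd).symm
          have IH := goA_eq_winF t (i+1)
          subst hb' hc' hd'
          show (if t[i] = t[i+1] ∧ t[i] = t[i+2] ∧ t[i] = t[i+3] then false else norepeatsGoA t (i+1))
              = winF (t.drop i)
          rw [hd, hd1, hd2, hd3, winF, ← hd3, ← hd2, ← hd1, IH]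
  · rw [norepeatsGoA, if_neg h]
    have hlt : (t.drop i).length < 4 := by simp; omega
    exact (winF_short _ hlt).symm
termination_by t.length - i

-- skipping one/two/three copies of p before a different character keeps winF unchanged
theorem winF_skip1 (p c : Char) (rest : List Char) (hpc : p ≠ c) :
    winF (p :: c :: rest) = winF (c :: rest) := by
  match rest with
  | [] => rfl
  | [_] => rfl
  | r :: s :: tl => rw [winF, if_neg (fun h => hpc h.1)]

theorem winF_skip2 (p c : Char) (rest : List Char) (hpc : p ≠ c) :
    winF (p :: p :: c :: rest) = winF (c :: rest) := by
  match rest with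
  | [] => rfl
  | r :: tl => rw [winF, if_neg (fun h => hpc h.2.1), winF_skip1 p c _ hpc]

theorem winF_skip3 (p c : Char) (rest : List Char) (hpc : p ≠ c) :
    winF (p :: p :: p :: c :: rest) = winF (c :: rest) := by
  rw [winF, if_neg (fun h => hpc h.2.2), winF_skip2 p c _ hpc]

theorem winF_skip (p c : Char) (rest : List Char) (hne : c ≠ p) :
    ∀ k, k ≤ 3 → winF (List.replicate k p ++ c :: rest) = winF (c :: rest) := by
  intro k hk
  have hpc : p ≠ c := fun h => hne h.symm
  interval_cases k
  · simp
  · simpa [List.replicate] using winF_skip1 p c rest hpc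
  · simpa [List.replicate] using winF_skip2 p c rest hpc
  · simpa [List.replicate] using winF_skip3 p c rest hpc

-- B's run-length loop equals the window scan over (current run ++ remaining input)
theorem goB_eq_winF (l : List Char) : ∀ (p : Char) (k : Nat), 1 ≤ k → k ≤ 3 →
    norepeatsGoB l p k = winF (List.replicate k p ++ l) := by
  induction l with
  | nil =>
      intro p k _ hk3
      have hlt : (List.replicate k p ++ ([] : List Char)).length < 4 := by simp; omega
      rw [norepeatsGoB, winF_short _ hlt]
  | cons c rest ih =>
      intro p k hk1 hk3
      by_cases hcp : c = p
      · subst hcp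
        by_cases h4 : k + 1 ≥ 4
        · have hk : k = 3 := by omega
          subst hk
          simp [norepeatsGoB, winF, List.replicate]
        · have hrepl : List.replicate k c ++ c :: rest = List.replicate (k+1) c ++ rest := by
            rw [List.replicate_succ']; simp
          rw [norepeatsGoB, if_pos rfl, if_neg h4, hrepl, ih c (k+1) (by omega) (by omega)]
      · rw [norepeatsGoB, if_neg hcp, ih c 1 le_rfl (by omega),
          winF_skip p c rest hcp k hk3]
        simp

-- ===== VERDICT (by name: the statement is the Claim_ definition above) =====
theorem norepeats_spec : Claim_equal_norepeats := by
  intro astring _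
  unfold Spec_norepeats norepeats norepeats_alt
  simp only [goA_eq_winF, List.drop_zero]
  cases h : (PySem.Str.replace astring "-" "").toList with
  | nil => rfl
  | cons c rest =>
      show winF (c :: rest) = norepeatsGoB rest c 1
      rw [goB_eq_winF rest c 1 le_rfl (by omega)]
      simp
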